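-- pv_equiv track=rewrite | github.com/Jiho1996/python_book | simsim/programmers_h_index.py | solution
-- ===== SOURCE A (Python) =====
-- def solution(citations):
--     answer = 0
--     citations_max = max(citations)
--
--     for i in range(1, citations_max):
--         cnt = 0
--         for j in range(len(citations)):
--             if citations[j] >= i :
--                 cnt +=1
--         if cnt == i :
--             answer+=cnt
--
--     return answer
-- ===== SOURCE B (Python) =====
-- def solution(citations):
--     # Sort once, then count values >= i by binary search instead of rescanning the list for each i.
--     m = max(citations)
--     a = sorted(citations)
--     n = len(a)
--     answer = 0
--     for i in range(1, m):
--         lo, hi = 0, n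
--         while lo < hi:
--             mid = (lo + hi) // 2
--             if a[mid] < i:
--                 lo = mid + 1
--             else:
--                 hi = mid
--         cnt = n - lo
--         if cnt == i:
--             answer += cnt
--     return answer
-- ===== Notes on version B (the rewrite author's own statement) =====
-- stated objective: faster
-- what changed: Sorts the citations once and replaces A's inner linear rescan per candidate i by a binary search for the first value >= i on the sorted copy, so each count of values >= i costs O(log n) instead of O(n).
import Mathlib
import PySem

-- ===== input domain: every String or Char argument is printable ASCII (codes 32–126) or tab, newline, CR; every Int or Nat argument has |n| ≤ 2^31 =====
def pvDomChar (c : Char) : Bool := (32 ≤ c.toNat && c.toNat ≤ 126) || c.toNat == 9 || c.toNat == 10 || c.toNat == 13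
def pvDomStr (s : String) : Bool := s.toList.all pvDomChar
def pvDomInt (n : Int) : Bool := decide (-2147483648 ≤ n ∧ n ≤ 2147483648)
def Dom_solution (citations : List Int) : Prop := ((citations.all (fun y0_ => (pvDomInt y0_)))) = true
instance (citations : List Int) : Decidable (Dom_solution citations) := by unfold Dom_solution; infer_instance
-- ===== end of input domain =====

-- B sorts once and binary-searches the count of values ≥ i, instead of A's inner linear rescan per i.

-- ===== PORT A =====
def solution (citations : List Int) : Int :=
  let citations_max := (PySem.List.max? citations (fun x => x)).getD 0
  (PySem.List.pyRange 1 citations_max 1).foldl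
    (fun answer i =>
      let cnt := (PySem.List.pyRange 0 (citations.length : Int) 1).foldl
        (fun cnt j => if i ≤ PySem.List.pyGetD citations j 0 then cnt + 1 else cnt) (0 : Int)
      if cnt = i then answer + cnt else answer)
    0

-- ===== PORT B =====
-- the 'while lo < hi' binary-search loop of Source B (a[mid] is always in range: lo < hi ≤ n)
def bsearchGE (a : List Int) (x : Int) (lo hi : Nat) : Nat :=
  if _h : lo < hi then
    let mid := (lo + hi) / 2
    if a.getD mid 0 < x then bsearchGE a x (mid + 1) hi else bsearchGE a x lo mid
  else lo
termination_by hi - lo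
decreasing_by all_goals omega

def solution_alt (citations : List Int) : Int :=
  let m := (PySem.List.max? citations (fun x => x)).getD 0
  let a := PySem.List.sorted citations (fun x => x) false
  let n := citations.length
  (PySem.List.pyRange 1 m 1).foldl
    (fun answer i =>
      let lo := bsearchGE a i 0 n
      let cnt : Int := (n : Int) - (lo : Int)
      if cnt = i then answer + cnt else answer)
    0

-- ===== PRECONDITION & SPEC =====
-- Pre_ excludes only the empty list, on which Python's max(citations) raises ValueError.
def Pre_solution (citations : List Int) : Prop := citations ≠ []
instance (citations : List Int) : Decidable (Pre_solution citations) := by unfold Pre_solution; infer_instance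
def pvWitness_solution : List Int := [3, 0, 6, 1, 5]

def Spec_solution (citations : List Int) (out : Int) : Prop := out = solution_alt citations
instance (citations : List Int) (out : Int) : Decidable (Spec_solution citations out) := by unfold Spec_solution; infer_instance

-- ===== CLAIM (what is proved, stated in full; the proofs are below) =====
def Claim_equal_solution : Prop := ∀ (citations : List Int), Dom_solution citations → Pre_solution citations → Spec_solution citations (solution citations)

-- ===== LEMMAS AND PROOFS =====

-- the loop never returns past hi
theorem bsearchGE_le_fuel (a : List Int) (x : Int) (fuel : Nat) :
    ∀ lo hi : Nat, hi - lo ≤ fuel → lo ≤ hi → bsearchGE a x lo hi ≤ hi := by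
  induction fuel with
  | zero =>
    intro lo hi hf h0
    rw [bsearchGE]
    simp only [show ¬ lo < hi by omega, dite_false]
    omega
  | succ fuel ih =>
    intro lo hi hf h0
    rw [bsearchGE]
    by_cases h : lo < hi
    · simp only [h, dite_true]
      by_cases hc : a.getD ((lo + hi) / 2) 0 < x
      · simp only [hc, if_true]
        exact ih ((lo + hi) / 2 + 1) hi (by omega) (by omega)
      · simp only [hc, if_false]
        exact Nat.le_trans (ih lo ((lo + hi) / 2) (by omega) (by omega)) (by omega)
    · simp only [h, dite_false]
      omega

theorem bsearchGE_le (a : List Int) (x : Int) (lo hi : Nat) (h0 : lo ≤ hi) :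
    bsearchGE a x lo hi ≤ hi :=
  bsearchGE_le_fuel a x (hi - lo) lo hi (by omega) h0

-- the binary-search loop lands on the boundary of the "< x" prefix of a sorted list
theorem bsearchGE_boundary_fuel (a : List Int) (x : Int)
    (hs : a.Pairwise (· ≤ ·)) (fuel : Nat) :
    ∀ lo hi : Nat, hi - lo ≤ fuel → hi ≤ a.length → lo ≤ hi →
    (∀ k, k < lo → ∀ hk : k < a.length, a[k] < x) →
    (∀ k, hi ≤ k → ∀ hk : k < a.length, x ≤ a[k]) →
    ∀ k, (hk : k < a.length) → (k < bsearchGE a x lo hi ↔ a[k] < x) := by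
  have hmono := List.pairwise_iff_getElem.mp hs
  induction fuel with
  | zero =>
    intro lo hi hf hhi hlohi hlo hhi' k hk
    rw [bsearchGE]
    simp only [show ¬ lo < hi by omega, dite_false]
    constructor
    · intro hklo; exact hlo k hklo hk
    · intro hax; by_contra hge
      have := hhi' k (by omega) hk
      omega
  | succ fuel ih =>
    intro lo hi hf hhi hlohi hlo hhi' k hk
    rw [bsearchGE]
    by_cases h : lo < hi
    · simp only [h, dite_true]
      have hmid : (lo + hi) / 2 < a.length := by omega
      have hmidget : a.getD ((lo + hi) / 2) 0 = a[(lo + hi) / 2] :=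
        List.getD_eq_getElem a 0 hmid
      by_cases hc : a.getD ((lo + hi) / 2) 0 < x
      · simp only [hc, if_true]
        refine ih ((lo + hi) / 2 + 1) hi (by omega) hhi (by omega) ?_ hhi' k hk
        intro k2 hk2 hk2'
        by_cases hkm : k2 = (lo + hi) / 2
        · subst hkm; rw [← hmidget]; exact hc
        · have h1 : a[k2] ≤ a[(lo + hi) / 2] := hmono k2 _ hk2' hmid (by omega)
          have h2 : a[(lo + hi) / 2] < x := by rw [← hmidget]; exact hc
          omega
      · simp only [hc, if_false]
        refine ih lo ((lo + hi) / 2) (by omega) (by omega) (by omega) hlo ?_ k hk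
        intro k2 hk2 hk2'
        have h2 : x ≤ a[(lo + hi) / 2] := by rw [← hmidget]; omega
        by_cases hkm : k2 = (lo + hi) / 2
        · subst hkm; exact h2
        · have h1 : a[(lo + hi) / 2] ≤ a[k2] := hmono _ k2 hmid hk2' (by omega)
          omega
    · simp only [h, dite_false]
      constructor
      · intro hklo; exact hlo k hklo hk
      · intro hax; by_contra hge
        have := hhi' k (by omega) hk
        omega

theorem bsearchGE_boundary (a : List Int) (x : Int)
    (hs : a.Pairwise (· ≤ ·)) (lo hi : Nat) (hhi : hi ≤ a.length) (hlohi : lo ≤ hi)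
    (hlo : ∀ k, k < lo → ∀ hk : k < a.length, a[k] < x)
    (hhi' : ∀ k, hi ≤ k → ∀ hk : k < a.length, x ≤ a[k]) :
    ∀ k, (hk : k < a.length) → (k < bsearchGE a x lo hi ↔ a[k] < x) :=
  bsearchGE_boundary_fuel a x hs (hi - lo) lo hi (by omega) hhi hlohi hlo hhi'

-- countP of a predicate that holds exactly on indices < r equals r
theorem countP_eq_of_prefix (a : List Int) (p : Int → Bool) (r : Nat) (hr : r ≤ a.length)
    (h : ∀ k, (hk : k < a.length) → (k < r ↔ p a[k] = true)) :
    a.countP p = r := by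
  induction a generalizing r with
  | nil => simpa using (Nat.le_zero.mp hr).symm
  | cons y t ih =>
    rcases Nat.eq_zero_or_pos r with hr0 | hrpos
    · subst hr0
      rw [List.countP_eq_zero.mpr]
      intro z hz
      rcases List.mem_iff_getElem.mp hz with ⟨k, hk, rfl⟩
      intro hp
      exact absurd ((h k hk).mpr hp) (by omega)
    · have hy : p y = true := (h 0 (by simp)).mp hrpos
      have ht : t.countP p = r - 1 := by
        apply ih (r - 1) (by simp at hr; omega)
        intro k hk
        have h2 := h (k + 1) (by simp; omega)
        simp only [List.getElem_cons_succ] at h2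
        rw [← h2]
        omega
      rw [List.countP_cons, hy, ht]
      simp; omega

-- the two per-i counts agree: A's linear scan = n - (B's binary-search boundary)
theorem cnt_eq (citations : List Int) (i : Int) :
    (PySem.List.pyRange 0 (citations.length : Int) 1).foldl
        (fun cnt j => if i ≤ PySem.List.pyGetD citations j 0 then cnt + 1 else cnt) (0 : Int)
      = (citations.length : Int) - (bsearchGE (PySem.List.sorted citations (fun x => x) false) i 0 citations.length : Int) := by
  set a := PySem.List.sorted citations (fun x => x) false with ha
  have hperm : a.Perm citations := PySem.List.sorted_perm citations (fun x => x) false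
  have hlen : a.length = citations.length := hperm.length_eq
  have hs : a.Pairwise (· ≤ ·) := by
    simpa using PySem.List.sorted_pairwise citations (fun x => x)
  -- A side: fold = countP (i ≤ ·)
  have hA : (PySem.List.pyRange 0 (citations.length : Int) 1).foldl
        (fun cnt j => if i ≤ PySem.List.pyGetD citations j 0 then cnt + 1 else cnt) (0 : Int)
      = (citations.countP (fun c => decide (i ≤ c)) : Int) := by
    rw [PySem.List.foldl_pyRange_zero_pyGetD' citations 0
          (fun cnt c => if i ≤ c then cnt + 1 else cnt) 0]
    rw [PySem.List.foldl_ite_add_one (fun c => i ≤ c) citations 0]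
    simp
  -- B side: boundary = countP (· < i)
  set r := bsearchGE a i 0 citations.length with hrdef
  have hrle : r ≤ citations.length := bsearchGE_le a i 0 citations.length (by omega)
  have hb := bsearchGE_boundary a i hs 0 citations.length (by omega) (by omega)
      (by intro k hk hk'; omega) (by intro k hk hk'; omega)
  have hr : a.countP (fun c => decide (c < i)) = r := by
    apply countP_eq_of_prefix a _ r (by omega)
    intro k hk
    simpa using hb k hk
  have hsplit : a.length = a.countP (fun c => decide (c < i)) + a.countP (fun c => decide (i ≤ c)) := by
    have := List.length_eq_countP_add_countP (fun c => decide (c < i)) (l := a)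
    simpa [Int.not_lt] using this
  have hcp : citations.countP (fun c => decide (i ≤ c)) = a.countP (fun c => decide (i ≤ c)) :=
    (hperm.countP_eq _).symm
  rw [hA, hcp]
  omega

-- ===== VERDICT (by name: the statement is the Claim_ definition above) =====
theorem solution_spec : Claim_equal_solution := by
  unfold Claim_equal_solution
  intro citations _ _
  show solution citations = solution_alt citations
  show List.foldl
      (fun (answer i : Int) =>
        let cnt := (PySem.List.pyRange 0 (citations.length : Int) 1).foldl
          (fun cnt j => if i ≤ PySem.List.pyGetD citations j 0 then cnt + 1 else cnt) (0 : Int)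
        if cnt = i then answer + cnt else answer)
      0 (PySem.List.pyRange 1 ((PySem.List.max? citations (fun x => x)).getD 0) 1)
    = List.foldl
      (fun (answer i : Int) =>
        let lo := bsearchGE (PySem.List.sorted citations (fun x => x) false) i 0 citations.length
        let cnt : Int := (citations.length : Int) - (lo : Int)
        if cnt = i then answer + cnt else answer)
      0 (PySem.List.pyRange 1 ((PySem.List.max? citations (fun x => x)).getD 0) 1)
  refine congrArg (fun f => List.foldl f (0 : Int)
      (PySem.List.pyRange 1 ((PySem.List.max? citations (fun x => x)).getD 0) 1)) ?_
  funext answer i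
  show (let cnt := (PySem.List.pyRange 0 (citations.length : Int) 1).foldl
          (fun cnt j => if i ≤ PySem.List.pyGetD citations j 0 then cnt + 1 else cnt) (0 : Int)
        if cnt = i then answer + cnt else answer)
    = (let cnt : Int := (citations.length : Int)
          - (bsearchGE (PySem.List.sorted citations (fun x => x) false) i 0 citations.length : Int)
        if cnt = i then answer + cnt else answer)
  rw [cnt_eq citations i]
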